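-- pv_equiv track=rewrite | github.com/lhuthng/game-Chomp | py_core/iterator.py | zigzag_iterator
-- ===== SOURCE A (Python) =====
-- def zigzag_iterator(board):
--     x, y = 0, 0
--     length = len(board)
--     limit = max([i + e for i, e in enumerate(board)]) + 1
--     while x + y < limit:
--         x, y = x - 1, y + 1
--         if x == -1:
--             x, y = x + y + 1, 0
--         if y > length:
--             x, y = 0, x + y
--         if y < length and x < board[y]:
--             yield (x, y)
-- ===== SOURCE B (Python) =====
-- def zigzag_iterator(board):
--     length = len(board)
--     limit = max(i + e for i, e in enumerate(board)) + 1
--     for s in range(1, limit):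
--         for y in range(min(s, length - 1) + 1):
--             x = s - y
--             if x < board[y]:
--                 yield (x, y)
-- ===== Notes on version B (the rewrite author's own statement) =====
-- stated objective: alternative
-- what changed: Replaces A's stepping state machine (x,y cursor with three reset rules walked cell by cell) by two closed-form nested loops: for each diagonal sum s emit (s-y,y) for y ascending, testing y < len and s-y < board[y] directly.
import Mathlib
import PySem

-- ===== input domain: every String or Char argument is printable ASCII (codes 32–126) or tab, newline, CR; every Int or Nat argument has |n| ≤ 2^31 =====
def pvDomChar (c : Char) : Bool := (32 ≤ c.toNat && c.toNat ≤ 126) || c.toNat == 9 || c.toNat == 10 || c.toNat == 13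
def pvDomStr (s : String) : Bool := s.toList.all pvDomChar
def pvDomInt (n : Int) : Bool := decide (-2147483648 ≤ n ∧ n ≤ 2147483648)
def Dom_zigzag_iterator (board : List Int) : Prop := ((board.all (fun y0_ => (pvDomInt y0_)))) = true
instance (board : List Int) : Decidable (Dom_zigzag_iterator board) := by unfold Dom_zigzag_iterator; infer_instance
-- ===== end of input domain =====

-- B replaces A's stepping cursor state machine by two closed-form nested loops over
-- diagonal sums (alternative decomposition, same asymptotic cost); on the empty board
-- both Pythons raise ValueError (max of an empty sequence), excluded by Pre_.


-- board[y] for an in-range index (both Pythons only index with 0 ≤ y < len(board))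
def pvIdx (board : List Int) (y : Int) : Int := (PySem.List.pyGet? board y).getD 0

-- ===== PORT A =====
-- the while loop of A; fuel only makes the recursion total, it is chosen large enough below
def pvLoopA (board : List Int) (limit : Int) (fuel : Nat) (x y : Int) : List (Int × Int) :=
  match fuel with
  | 0 => []
  | Nat.succ f =>
    if x + y < limit then
      let p1 : Int × Int := (x - 1, y + 1)
      let p2 : Int × Int := if p1.1 = -1 then (p1.1 + p1.2 + 1, 0) else p1
      let p3 : Int × Int := if p2.2 > (board.length : Int) then (0, p2.1 + p2.2) else p2
      (if p3.2 < (board.length : Int) ∧ p3.1 < pvIdx board p3.2 then [(p3.1, p3.2)] else []) ++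
        pvLoopA board limit f p3.1 p3.2
    else []

def zigzag_iterator (board : List Int) : List (Int × Int) :=
  match PySem.List.max? ((PySem.List.enumerate board).map (fun p => p.1 + p.2)) (fun v => v) with
  | none => []   -- Python raises ValueError here (board = []); excluded by Pre_
  | some m =>
    pvLoopA board (m + 1) (((m + 1).toNat + 1) * (board.length + 4)) 0 0

-- ===== PORT B =====
-- inner loop of B: one diagonal, y ascending
def pvDiag (board : List Int) (s : Int) : List (Int × Int) :=
  (PySem.List.pyRange 0 (min s ((board.length : Int) - 1) + 1) 1).flatMap
    (fun y => if s - y < pvIdx board y then [(s - y, y)] else [])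

def zigzag_iterator_alt (board : List Int) : List (Int × Int) :=
  match PySem.List.max? ((PySem.List.enumerate board).map (fun p => p.1 + p.2)) (fun v => v) with
  | none => []   -- Python raises ValueError here (board = []); excluded by Pre_
  | some m =>
    (PySem.List.pyRange 1 (m + 1) 1).flatMap (fun s => pvDiag board s)

-- ===== PRECONDITION & SPEC =====
-- Pre_ excludes only the empty board, on which both Pythons raise ValueError (max of empty sequence)
def Pre_zigzag_iterator (board : List Int) : Prop := board ≠ []
instance (board : List Int) : Decidable (Pre_zigzag_iterator board) := by unfold Pre_zigzag_iterator; infer_instance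
def pvWitness_zigzag_iterator : List Int := [2, 1]

def Spec_zigzag_iterator (board : List Int) (out : List (Int × Int)) : Prop := out = zigzag_iterator_alt board
instance (board : List Int) (out : List (Int × Int)) : Decidable (Spec_zigzag_iterator board out) := by unfold Spec_zigzag_iterator; infer_instance

-- ===== CLAIM (what is proved, stated in full; the proofs are below) =====
def Claim_equal_zigzag_iterator : Prop := ∀ (board : List Int), Dom_zigzag_iterator board → Pre_zigzag_iterator board → Spec_zigzag_iterator board (zigzag_iterator board)

-- ===== LEMMAS AND PROOFS =====

-- remaining cells of diagonal s strictly after column y (B's inner loop resumed at y+1)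
def pvDiagTail (board : List Int) (s y : Int) : List (Int × Int) :=
  (PySem.List.pyRange (y + 1) (min s ((board.length : Int) - 1) + 1) 1).flatMap
    (fun y' => if s - y' < pvIdx board y' then [(s - y', y')] else [])

-- all diagonals from t on (B's outer loop resumed at t)
def pvRest (board : List Int) (limit t : Int) : List (Int × Int) :=
  (PySem.List.pyRange t limit 1).flatMap (fun s => pvDiag board s)

-- fuel needed from loop head (s - y, y)
def pvNeeded (board : List Int) (m s y : Int) : Nat :=
  (m + 1 - s).toNat * (board.length + 4) + ((board.length : Int) + 3 - y).toNat

lemma pv_maxBound (board : List Int) (m : Int)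
    (hm : PySem.List.max? ((PySem.List.enumerate board).map (fun p => p.1 + p.2)) (fun v => v) = some m)
    (y : Int) (h0 : 0 ≤ y) (hlt : y < (board.length : Int)) :
    y + pvIdx board y ≤ m := by
  have hk : y.toNat < board.length := by omega
  have hidx : pvIdx board y = board[y.toNat] := by
    unfold pvIdx
    rw [PySem.List.pyGet?_eq_some_getElem board h0 hlt]
    rfl
  have hmem : (y, board[y.toNat]) ∈ PySem.List.enumerate board 0 := by
    rw [PySem.List.mem_enumerate_iff]
    refine ⟨y.toNat, hk, ?_⟩
    have h : (0 : Int) + (y.toNat : Int) = y := by omega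
    rw [h]
  have hmm : y + pvIdx board y ∈ (PySem.List.enumerate board).map (fun p => p.1 + p.2) :=
    List.mem_map.mpr ⟨(y, board[y.toNat]), hmem, by simp [hidx]⟩
  exact PySem.List.max?_isMax hm _ hmm

lemma pv_nonempty (board : List Int) (m : Int)
    (hm : PySem.List.max? ((PySem.List.enumerate board).map (fun p => p.1 + p.2)) (fun v => v) = some m) :
    1 ≤ (board.length : Int) := by
  cases board with
  | nil => simp [PySem.List.enumerate, PySem.List.max?] at hm
  | cons a t => simp only [List.length_cons]; omega

lemma pvDiagTail_self (board : List Int) (s : Int) : pvDiagTail board s s = [] := by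
  unfold pvDiagTail
  rw [PySem.List.pyRange_one_eq_nil (by omega : min s ((board.length : Int) - 1) + 1 ≤ s + 1)]
  rfl

lemma pvDiagTail_limit (board : List Int) (m : Int)
    (hm : PySem.List.max? ((PySem.List.enumerate board).map (fun p => p.1 + p.2)) (fun v => v) = some m)
    (y : Int) (hy : 0 ≤ y) : pvDiagTail board (m + 1) y = [] := by
  unfold pvDiagTail
  rw [List.flatMap_eq_nil_iff.mpr]
  intro y' hy'
  rw [PySem.List.mem_pyRange_one] at hy'
  have h0 : 0 ≤ y' := by omega
  have hlt : y' < (board.length : Int) := by omega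
  have := pv_maxBound board m hm y' h0 hlt
  rw [if_neg (by omega)]

lemma pvRest_cons (board : List Int) (limit t : Int) (h : t < limit) :
    pvRest board limit t = pvDiag board t ++ pvRest board limit (t + 1) := by
  unfold pvRest
  rw [PySem.List.pyRange_one_cons h, List.flatMap_cons]

lemma pvRest_nil (board : List Int) (limit t : Int) (h : limit ≤ t) :
    pvRest board limit t = [] := by
  unfold pvRest
  rw [PySem.List.pyRange_one_eq_nil h, List.flatMap_nil]

lemma pvDiagTail_nil (board : List Int) (s y : Int)
    (h : min s ((board.length : Int) - 1) + 1 ≤ y + 1) : pvDiagTail board s y = [] := by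
  unfold pvDiagTail
  rw [PySem.List.pyRange_one_eq_nil h, List.flatMap_nil]

lemma pvDiag_cons (board : List Int) (s : Int) (hs : 0 ≤ s) (hL : 1 ≤ (board.length : Int)) :
    pvDiag board s = (if s < pvIdx board 0 then [(s, 0)] else []) ++ pvDiagTail board s 0 := by
  unfold pvDiag pvDiagTail
  rw [PySem.List.pyRange_one_cons (by omega : (0 : Int) < min s ((board.length : Int) - 1) + 1),
      List.flatMap_cons]
  norm_num

lemma pvDiagTail_cons (board : List Int) (s y : Int) (h1 : y < s)
    (h2 : y + 1 ≤ (board.length : Int) - 1) :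
    pvDiagTail board s y =
      (if s - (y + 1) < pvIdx board (y + 1) then [(s - (y + 1), y + 1)] else []) ++
        pvDiagTail board s (y + 1) := by
  unfold pvDiagTail
  rw [PySem.List.pyRange_one_cons (by omega : y + 1 < min s ((board.length : Int) - 1) + 1),
      List.flatMap_cons]

lemma pvLoopA_eq (board : List Int) (m : Int)
    (hm : PySem.List.max? ((PySem.List.enumerate board).map (fun p => p.1 + p.2)) (fun v => v) = some m) :
    ∀ (fuel : Nat) (s y : Int), 0 ≤ y → y ≤ s → s ≤ m + 1 →
      (y ≤ (board.length : Int) ∨ y = s) → pvNeeded board m s y ≤ fuel →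
      pvLoopA board (m + 1) fuel (s - y) y = pvDiagTail board s y ++ pvRest board (m + 1) (s + 1) := by
  intro fuel
  induction fuel using Nat.strong_induction_on with
  | _ fuel IH =>
  intro s y hy0 hys hsm hyL hneed
  have hL : 1 ≤ (board.length : Int) := pv_nonempty board m hm
  rcases eq_or_lt_of_le hsm with hEq | hsLt
  · -- s = m + 1 : the loop guard fails, and B has no diagonal left either
    subst hEq
    have hrhs : pvDiagTail board (m + 1) y ++ pvRest board (m + 1) (m + 1 + 1) = [] := by
      rw [pvDiagTail_limit board m hm y hy0, pvRest_nil board _ _ (by omega), List.append_nil]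
    rw [hrhs]
    cases fuel with
    | zero => rfl
    | succ f =>
      simp only [pvLoopA]
      rw [if_neg (by omega : ¬ (m + 1 - y + y < m + 1))]
  · -- s < m + 1 : the loop runs at least one more step
    have hfuel1 : 1 ≤ fuel := by
      have hQ : 1 * (board.length + 4) ≤ (m + 1 - s).toNat * (board.length + 4) :=
        Nat.mul_le_mul_right _ (by omega)
      unfold pvNeeded at hneed
      set Q := (m + 1 - s).toNat * (board.length + 4) with hQdef
      clear_value Q
      omega
    obtain ⟨f, rfl⟩ : ∃ f, fuel = f + 1 := ⟨fuel - 1, by omega⟩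
    simp only [pvLoopA]
    rw [if_pos (by omega : s - y + y < m + 1)]
    by_cases hcase : y = s
    · -- head (0, s): x becomes -1, jump to the next diagonal's head (s+1, 0)
      subst hcase
      simp only [sub_self]
      rw [if_pos (by norm_num : (0 : Int) - 1 = -1)]
      dsimp only
      rw [if_neg (by omega : ¬ ((0 : Int) > (board.length : Int)))]
      dsimp only
      have hstep : (0 : Int) - 1 + (y + 1) + 1 = y + 1 := by ring
      rw [hstep]
      have hrec := IH f (by omega) (y + 1) 0 le_rfl (by omega) (by omega) (Or.inl (by omega))
        (by
          unfold pvNeeded at hneed ⊢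
          have hA : (m + 1 - y).toNat = (m + 1 - (y + 1)).toNat + 1 := by omega
          rw [hA, Nat.succ_mul] at hneed
          set P := (m + 1 - (y + 1)).toNat * (board.length + 4) with hPdef
          clear_value P
          omega)
      rw [sub_zero] at hrec
      rw [hrec, pvDiagTail_self, List.nil_append]
      by_cases hend : y + 1 < m + 1
      · rw [pvRest_cons board _ _ hend, pvDiag_cons board _ (by omega) hL, ← List.append_assoc]
        by_cases hc : y + 1 < pvIdx board 0
        · rw [if_pos (⟨by omega, hc⟩ : (0 : Int) < (board.length : Int) ∧ y + 1 < pvIdx board 0),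
              if_pos hc]
        · rw [if_neg (fun h => hc h.2), if_neg hc]
      · have hy1 : y + 1 = m + 1 := by omega
        have hb0 := pv_maxBound board m hm 0 le_rfl (by omega)
        rw [hy1, pvDiagTail_limit board m hm 0 le_rfl, pvRest_nil board _ _ (by omega),
            pvRest_nil board _ _ (by omega)]
        rw [if_neg (by rintro ⟨-, h⟩; omega :
              ¬ ((0 : Int) < (board.length : Int) ∧ m + 1 < pvIdx board 0))]
        rfl
    · -- head (s - y, y) with y < s: a plain step along the diagonal
      have hylt : y < s := lt_of_le_of_ne hys hcase
      rw [if_neg (by omega : ¬ (s - y - 1 = -1))]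
      dsimp only
      by_cases hjump : y + 1 > (board.length : Int)
      · -- y = length: the wrap branch fires, state becomes (0, s)
        have hyeq : y = (board.length : Int) := by
          rcases hyL with h | h
          · omega
          · exact absurd h hcase
        rw [if_pos (by omega : y + 1 > (board.length : Int))]
        dsimp only
        have hsum : s - y - 1 + (y + 1) = s := by ring
        rw [hsum]
        have hrec := IH f (by omega) s s (by omega) le_rfl (by omega) (Or.inr rfl)
          (by
            unfold pvNeeded at hneed ⊢
            set P := (m + 1 - s).toNat * (board.length + 4) with hPdef
            clear_value P
            omega)
        rw [sub_self] at hrec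
        rw [hrec, pvDiagTail_self, List.nil_append]
        rw [if_neg (by rintro ⟨h, -⟩; omega : ¬ (s < (board.length : Int) ∧ 0 < pvIdx board s))]
        rw [pvDiagTail_nil board s y (by omega), List.nil_append]
      · -- y + 1 ≤ length: ordinary move to (s - y - 1, y + 1)
        have hyL1 : y + 1 ≤ (board.length : Int) := by omega
        rw [if_neg hjump]
        dsimp only
        have hsub : s - y - 1 = s - (y + 1) := by ring
        have hrec := IH f (by omega) s (y + 1) (by omega) (by omega) (by omega) (Or.inl hyL1)
          (by
            unfold pvNeeded at hneed ⊢
            set P := (m + 1 - s).toNat * (board.length + 4) with hPdef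
            clear_value P
            omega)
        rw [hsub, hrec]
        by_cases hinner : y + 1 ≤ (board.length : Int) - 1
        · rw [pvDiagTail_cons board s y hylt hinner, ← List.append_assoc]
          by_cases hc : s - (y + 1) < pvIdx board (y + 1)
          · rw [if_pos (⟨by omega, hc⟩ :
                  y + 1 < (board.length : Int) ∧ s - (y + 1) < pvIdx board (y + 1)),
                if_pos hc]
          · rw [if_neg (fun h => hc h.2), if_neg hc]
        · rw [pvDiagTail_nil board s y (by omega), pvDiagTail_nil board s (y + 1) (by omega),
              List.nil_append]
          rw [if_neg (by rintro ⟨h, -⟩; omega :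
                ¬ (y + 1 < (board.length : Int) ∧ s - (y + 1) < pvIdx board (y + 1)))]
          rw [List.nil_append]

-- ===== VERDICT (by name: the statement is the Claim_ definition above) =====
theorem zigzag_iterator_spec : Claim_equal_zigzag_iterator := by
  intro board hdom hpre
  unfold Spec_zigzag_iterator zigzag_iterator zigzag_iterator_alt
  cases hmax : PySem.List.max? ((PySem.List.enumerate board).map (fun p => p.1 + p.2)) (fun v => v) with
  | none => rfl
  | some m =>
    have hL : 1 ≤ (board.length : Int) := pv_nonempty board m hmax
    dsimp only
    by_cases hpos : 0 < m + 1
    · have h := pvLoopA_eq board m hmax (((m + 1).toNat + 1) * (board.length + 4)) 0 0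
        le_rfl le_rfl (by omega) (Or.inl (by omega))
        (by
          unfold pvNeeded
          have hA : (m + 1).toNat + 1 = ((m + 1 - 0).toNat) + 1 := by omega
          rw [hA, Nat.succ_mul]
          set P := (m + 1 - 0).toNat * (board.length + 4) with hPdef
          clear_value P
          omega)
      norm_num at h
      rw [h, pvDiagTail_self, List.nil_append]
      rfl
    · obtain ⟨f, hf⟩ : ∃ f, ((m + 1).toNat + 1) * (board.length + 4) = f + 1 :=
        ⟨((m + 1).toNat + 1) * (board.length + 4) - 1,
          (Nat.succ_pred_eq_of_pos (Nat.mul_pos (Nat.succ_pos (m + 1).toNat)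
            (by omega : 0 < board.length + 4))).symm⟩
      rw [hf]
      simp only [pvLoopA]
      rw [if_neg (by omega : ¬ ((0 : Int) + 0 < m + 1)),
          PySem.List.pyRange_one_eq_nil (by omega : m + 1 ≤ 1), List.flatMap_nil]
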